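-- pv_equiv track=rewrite | github.com/Raizus/rosalind-bioinformatics | BioInfoToolkit/Spectrometry/Spectrometry.py | spectrumConvolution
-- ===== SOURCE A (Python) =====
-- from collections import Counter, OrderedDict
--
-- def spectrumConvolution(spectrum: list[int]) -> Counter[int]:
--     "We define the convolution of a cyclic spectrum by taking all positive differences of masses in the spectrum."
--     conv: list[int] = []
--     spectrum = sorted(spectrum)
--     for i1, m1 in enumerate(spectrum[:-1]):
--         for _, m2 in enumerate(spectrum[i1+1:]):
--             diff = m2-m1
--             if diff > 0:
--                 conv.append(diff)
--
--     conv2 = Counter(conv)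
--     return conv2
-- ===== SOURCE B (Python) =====
-- from collections import Counter
--
-- def spectrumConvolution(spectrum: list[int]) -> Counter[int]:
--     "We define the convolution of a cyclic spectrum by taking all positive differences of masses in the spectrum."
--     freq = Counter(spectrum)
--     keys = sorted(freq)
--     conv2: Counter[int] = Counter()
--     for i, a in enumerate(keys):
--         for b in keys[i + 1:]:
--             conv2[b - a] += freq[a] * freq[b]
--     return conv2
-- ===== Notes on version B (the rewrite author's own statement) =====
-- stated objective: alternative
-- what changed: Instead of collecting a list of all positive pairwise differences of the sorted spectrum and counting it, B builds a Counter of the spectrum once and iterates over pairs of distinct sorted values, adding the product of the two multiplicities to the difference's count (zero differences vanish since equal values never form a cross pair).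
import Mathlib
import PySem

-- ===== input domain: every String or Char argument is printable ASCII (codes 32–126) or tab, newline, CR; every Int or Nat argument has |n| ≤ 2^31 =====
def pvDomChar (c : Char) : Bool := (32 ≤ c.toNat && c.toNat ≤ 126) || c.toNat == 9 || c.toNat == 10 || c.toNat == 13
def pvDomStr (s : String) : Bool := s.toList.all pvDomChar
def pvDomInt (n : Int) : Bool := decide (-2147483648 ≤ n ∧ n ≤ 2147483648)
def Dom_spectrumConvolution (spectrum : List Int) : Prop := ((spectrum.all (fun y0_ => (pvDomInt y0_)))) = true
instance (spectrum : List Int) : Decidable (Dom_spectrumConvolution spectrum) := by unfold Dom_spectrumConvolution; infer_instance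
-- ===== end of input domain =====

-- B replaces A's pass over all element pairs of the sorted spectrum by a pass over pairs of
-- DISTINCT sorted values, weighting each difference by the product of the two multiplicities
-- (objective: alternative algorithm; same return value, counts and insertion order included).

-- ===== PORT A =====
def spectrumConvolution (spectrum : List Int) : List (Int × Int) :=
  let s := PySem.List.sorted spectrum (fun x => x) false
  let conv : List Int :=
    (PySem.List.enumerate (PySem.List.slice s none (some (-1)))).foldl
      (fun conv p =>
        (PySem.List.enumerate (PySem.List.slice s (some (p.1 + 1)) none)).foldl
          (fun conv q =>
            let diff := q.2 - p.2
            if diff > 0 then conv ++ [diff] else conv) conv) []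
  (PySem.Dict.counter conv).items

-- ===== PORT B =====
def spectrumConvolution_alt (spectrum : List Int) : List (Int × Int) :=
  let freq := PySem.Dict.counter spectrum
  let keys := PySem.List.sorted (PySem.Dict.keys freq) (fun x => x) false
  let conv2 :=
    (PySem.List.enumerate keys).foldl
      (fun d p =>
        (PySem.List.slice keys (some (p.1 + 1)) none).foldl
          (fun d b => d.modify (b - p.2) 0 (· + freq.getD p.2 0 * freq.getD b 0)) d)
      PySem.Dict.empty
  PySem.Dict.items conv2

-- ===== PRECONDITION & SPEC =====
def Spec_spectrumConvolution (spectrum : List Int) (out : List (Int × Int)) : Prop := out = spectrumConvolution_alt spectrum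
instance (spectrum : List Int) (out : List (Int × Int)) : Decidable (Spec_spectrumConvolution spectrum out) := by unfold Spec_spectrumConvolution; infer_instance

-- ===== CLAIM (what is proved, stated in full; the proofs are below) =====
def Claim_equal_spectrumConvolution : Prop := ∀ (spectrum : List Int), Dom_spectrumConvolution spectrum → Spec_spectrumConvolution spectrum (spectrumConvolution spectrum)

-- ===== LEMMAS AND PROOFS =====

-- generic "loop over tails" recursion: for i, x in enumerate(s): body using x and s[i+1:]
def tailsFold {α σ : Type} (H : α → List α → σ → σ) : List α → σ → σ
  | [], acc => acc
  | x :: t, acc => tailsFold H t (H x t acc)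

-- A's inner loop body over the tail t, collecting positive differences
def innerA (a : Int) (t : List Int) (acc : List Int) : List Int :=
  t.foldl (fun acc y => if y - a > 0 then acc ++ [y - a] else acc) acc

-- B's inner loop body over the tail t of distinct keys, adding weighted differences
def innerB (w : Int → Int) (a : Int) (t : List Int) (d : PySem.Dict Int Int) : PySem.Dict Int Int :=
  t.foldl (fun d b => d.modify (b - a) 0 (· + w a * w b)) d

-- A's conv list, recursively
def convA : List Int → List Int
  | [] => []
  | x :: t => (t.filter (fun y => decide (y - x > 0))).map (fun y => y - x) ++ convA t

-- counting fold (Counter continuation)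
def cfold (l : List Int) (d : PySem.Dict Int Int) : PySem.Dict Int Int :=
  l.foldl (fun d x => d.modify x 0 (· + 1)) d

-- a fold over enumerate whose body ignores the index is a fold over the list
theorem foldl_enumerate_snd {α β : Type} (xs : List α) (g : β → α → β) :
    ∀ (n : Int) (a : β), (PySem.List.enumerate xs n).foldl (fun a p => g a p.2) a = xs.foldl g a := by
  induction xs with
  | nil => intro n a; rfl
  | cons x t ih => intro n a; rw [PySem.List.enumerate_cons]; simp only [List.foldl_cons]; exact ih (n+1) (g a x)

-- the enumerate/slice "loop over tails" shape is tailsFold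
theorem foldl_enum_tails {α σ : Type} (s : List α) (H : α → List α → σ → σ) :
    ∀ (t : List α) (k : Nat), t = s.drop k → ∀ (acc : σ),
      (PySem.List.enumerate t (k : Int)).foldl
        (fun acc p => H p.2 (s.drop (p.1 + 1).toNat) acc) acc
      = tailsFold H t acc := by
  intro t
  induction t with
  | nil => intro k _ acc; rfl
  | cons x t ih =>
    intro k hk acc
    have ht : t = s.drop (k + 1) := by
      rw [← List.tail_drop, ← hk]
      rfl
    rw [PySem.List.enumerate_cons]
    simp only [List.foldl_cons, tailsFold]
    have h1 : ((k : Int) + 1).toNat = k + 1 := by omega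
    have h2 : ((k : Int) + 1) = ((k + 1 : Nat) : Int) := by omega
    rw [h1, ← ht, h2]
    exact ih (k + 1) ht (H x t acc)

theorem tailsFold_innerA (s : List Int) : ∀ acc, tailsFold innerA s acc = acc ++ convA s := by
  induction s with
  | nil => intro acc; simp [tailsFold, convA]
  | cons x t ih =>
    intro acc
    simp only [tailsFold, convA, ih, innerA]
    rw [PySem.List.foldl_append_ite (p := fun y => y - x > 0) (f := fun y => y - x)]
    simp [List.append_assoc]

-- A's conv list of a run of n equal values followed by T: each of the n copies contributes the
-- same positive differences (the intra-run zero differences are filtered out)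
theorem convA_replicate_append (a : Int) (T : List Int) : ∀ (n : Nat),
    convA (List.replicate n a ++ T)
    = (List.replicate n ((T.filter (fun y => decide (y - a > 0))).map (fun y => y - a))).flatten
      ++ convA T := by
  intro n
  induction n with
  | zero => simp
  | succ m ih =>
    rw [List.replicate_succ, List.cons_append]
    show convA (a :: (List.replicate m a ++ T)) = _
    rw [show convA (a :: (List.replicate m a ++ T))
        = ((List.replicate m a ++ T).filter (fun y => decide (y - a > 0))).map (fun y => y - a)
          ++ convA (List.replicate m a ++ T) from rfl]
    rw [ih, List.filter_append, List.replicate_succ, List.flatten_cons]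
    have : (List.replicate m a).filter (fun y => decide (y - a > 0)) = [] := by
      apply List.filter_eq_nil_iff.mpr
      intro y hy
      rw [List.eq_of_mem_replicate hy]
      simp
    rw [this]
    simp [List.append_assoc]

-- ===== Dict lemmas (items-level, insertion order included) =====
theorem dict_modify_modify_self {κ ν : Type} [BEq κ] [LawfulBEq κ]
    (d : PySem.Dict κ ν) (k : κ) (d0 : ν) (f g : ν → ν) :
    (d.modify k d0 f).modify k d0 g = d.modify k d0 (fun v => g (f v)) := by
  simp [PySem.Dict.modify, PySem.Dict.getD_insert_self, PySem.Dict.insert_insert_self]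

theorem dict_contains_modify {κ ν : Type} [BEq κ] [LawfulBEq κ]
    (d : PySem.Dict κ ν) (k k' : κ) (d0 : ν) (f : ν → ν) (hc : d.contains k = true) :
    (d.modify k' d0 f).contains k = true := by
  rw [PySem.Dict.modify, PySem.Dict.contains_insert]
  simp [hc]

-- an in-place overwrite at one key does not change which keys the item list carries
theorem any_key_map {κ ν : Type} [BEq κ] [LawfulBEq κ]
    (l : List (κ × ν)) {k k' : κ} (v' : ν) :
    (l.map (fun p => if p.1 == k' then (k', v') else p)).any (fun p => p.1 == k)
    = l.any (fun p => p.1 == k) := by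
  rw [List.any_map]
  apply PySem.List.any_congr_mem
  intro p _
  by_cases h : p.1 = k'
  · simp [h]
  · simp [h]

-- insertion at a fresh key commutes (as item lists) with insertion at an already contained key
theorem dict_insert_comm_of_contains {κ ν : Type} [BEq κ] [LawfulBEq κ]
    (d : PySem.Dict κ ν) {k k' : κ} (v v' : ν) (hc : d.contains k = true) (hne : k ≠ k') :
    (d.insert k' v').insert k v = (d.insert k v).insert k' v' := by
  obtain ⟨l⟩ := d
  have hck : (List.any l fun p => p.1 == k) = true := by
    simpa [PySem.Dict.contains_mk] using hc
  by_cases hc' : (List.any l fun p => p.1 == k') = true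
  · -- both keys present: both inserts are in-place overwrites and commute elementwise
    rw [PySem.Dict.insert, PySem.Dict.insert, PySem.Dict.insert, PySem.Dict.insert]
    simp only [PySem.Dict.contains_mk, hck, hc', if_pos, any_key_map]
    apply PySem.Dict.ext
    simp only [List.map_map]
    apply List.map_congr_left
    intro p _
    by_cases h1 : p.1 = k <;> by_cases h2 : p.1 = k' <;>
      simp [Function.comp, h1, h2, hne, Ne.symm hne]
  · -- k' absent: it is appended on one side and appended after the overwrite on the other
    have h1 : PySem.Dict.insert ⟨l⟩ k' v' = (⟨l ++ [(k', v')]⟩ : PySem.Dict κ ν) := by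
      rw [PySem.Dict.insert, if_neg (by simp [PySem.Dict.contains_mk, hc'])]
    have h2 : PySem.Dict.insert (⟨l ++ [(k', v')]⟩ : PySem.Dict κ ν) k v
        = (⟨(l ++ [(k', v')]).map (fun p => if p.1 == k then (k, v) else p)⟩ : PySem.Dict κ ν) := by
      rw [PySem.Dict.insert, if_pos (by rw [PySem.Dict.contains_mk, List.any_append]; simp [hck])]
    have h3 : PySem.Dict.insert (⟨l⟩ : PySem.Dict κ ν) k v
        = (⟨l.map (fun p => if p.1 == k then (k, v) else p)⟩ : PySem.Dict κ ν) := by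
      rw [PySem.Dict.insert, if_pos (by simpa [PySem.Dict.contains_mk] using hck)]
    have h4 : PySem.Dict.insert (⟨l.map (fun p => if p.1 == k then (k, v) else p)⟩ : PySem.Dict κ ν) k' v'
        = (⟨l.map (fun p => if p.1 == k then (k, v) else p) ++ [(k', v')]⟩ : PySem.Dict κ ν) := by
      rw [PySem.Dict.insert, if_neg]
      rw [PySem.Dict.contains_mk, any_key_map]
      simpa using hc'
    rw [h1, h2, h3, h4]
    apply PySem.Dict.ext
    simp [Ne.symm hne]

theorem dict_modify_comm_of_contains {κ ν : Type} [BEq κ] [LawfulBEq κ]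
    (d : PySem.Dict κ ν) {k k' : κ} (d0 : ν) (f g : ν → ν)
    (hc : d.contains k = true) (hne : k ≠ k') :
    (d.modify k' d0 g).modify k d0 f = (d.modify k d0 f).modify k' d0 g := by
  rw [PySem.Dict.modify, PySem.Dict.modify, PySem.Dict.modify, PySem.Dict.modify]
  rw [PySem.Dict.getD_insert_of_ne d (k := k') (k' := k) _ _ hne]
  rw [PySem.Dict.getD_insert_of_ne d (k := k) (k' := k') _ _ (Ne.symm hne)]
  exact dict_insert_comm_of_contains d _ _ hc hne

-- a modify at a contained key not touched by the loop commutes past the loop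
theorem dict_modify_foldl_comm {α κ ν : Type} [BEq κ] [LawfulBEq κ]
    (r : List α) (key : α → κ) (d0 : ν) (g : α → ν → ν) {k : κ} (f : ν → ν) :
    ∀ (d : PySem.Dict κ ν), d.contains k = true → (∀ b ∈ r, key b ≠ k) →
      (r.foldl (fun d b => d.modify (key b) d0 (g b)) d).modify k d0 f
      = r.foldl (fun d b => d.modify (key b) d0 (g b)) (d.modify k d0 f) := by
  induction r with
  | nil => intro d _ _; rfl
  | cons b r ih =>
    intro d hc hk
    simp only [List.foldl_cons]
    rw [ih _ (dict_contains_modify _ _ _ _ _ hc) (fun x hx => hk x (List.mem_cons_of_mem b hx))]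
    rw [dict_modify_comm_of_contains d d0 f (g b) hc (Ne.symm (hk b List.mem_cons_self))]

-- two additive passes over pairwise-distinct keys fuse into one
theorem fold_modify_fuse (t : List Int) (key : Int → Int) (v w : Int → Int)
    (hinj : t.Pairwise (fun x y => key x ≠ key y)) :
    ∀ (d : PySem.Dict Int Int),
      t.foldl (fun d b => d.modify (key b) 0 (· + w b))
        (t.foldl (fun d b => d.modify (key b) 0 (· + v b)) d)
      = t.foldl (fun d b => d.modify (key b) 0 (· + (v b + w b))) d := by
  induction t with
  | nil => intro d; rfl
  | cons b r ih =>
    rw [List.pairwise_cons] at hinj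
    intro d
    simp only [List.foldl_cons]
    have hcont : (PySem.Dict.modify d (key b) 0 (· + v b)).contains (key b) = true := by
      rw [PySem.Dict.modify, PySem.Dict.contains_insert]
      simp
    rw [dict_modify_foldl_comm r key 0 (fun b' => (· + v b')) (· + w b) _ hcont
      (fun x hx => Ne.symm (hinj.1 x hx))]
    rw [dict_modify_modify_self]
    have hfun : (fun x => x + v b + w b) = (fun x => x + (v b + w b)) := by
      funext x; ring
    rw [hfun]
    exact ih hinj.2 (d.modify (key b) 0 (· + (v b + w b)))

theorem cfold_replicate (x : Int) : ∀ (m : Nat), 0 < m →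
    ∀ d, cfold (List.replicate m x) d = d.modify x 0 (· + (m : Int)) := by
  intro m
  induction m with
  | zero => omega
  | succ n ih =>
    intro _ d
    rw [List.replicate_succ]
    show cfold (List.replicate n x) (d.modify x 0 (· + 1)) = _
    by_cases hn : 0 < n
    · rw [ih hn, dict_modify_modify_self]
      have : (fun v : Int => v + 1 + (n : Int)) = (· + ((n + 1 : Nat) : Int)) := by
        funext v; push_cast; ring
      rw [this]
    · have : n = 0 := by omega
      subst this
      show d.modify x 0 (· + 1) = _
      norm_num

-- one counting pass over the diffs of one source element = one weighted pass over the distinct keys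
theorem cfold_onepass (t : List Int) (a : Int) (c : Int → Nat) (hpos : ∀ b ∈ t, 0 < c b) :
    ∀ d, cfold (t.flatMap (fun b => List.replicate (c b) (b - a))) d
      = t.foldl (fun d b => d.modify (b - a) 0 (· + (c b : Int))) d := by
  intro d
  unfold cfold
  rw [List.foldl_flatMap]
  apply PySem.List.foldl_congr_mem
  intro acc b hb
  exact cfold_replicate (b - a) (c b) (hpos b hb) acc

theorem cfold_multipass (t : List Int) (a : Int) (c : Int → Nat)
    (hpos : ∀ b ∈ t, 0 < c b) (hlt : t.Pairwise (· < ·)) :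
    ∀ (n : Nat), 0 < n → ∀ d,
      cfold (List.replicate n (t.flatMap (fun b => List.replicate (c b) (b - a)))).flatten d
      = t.foldl (fun d b => d.modify (b - a) 0 (· + (n : Int) * (c b : Int))) d := by
  have hinj : t.Pairwise (fun x y => x - a ≠ y - a) :=
    hlt.imp (fun h => by omega)
  intro n
  induction n with
  | zero => omega
  | succ m ih =>
    intro _ d
    rw [List.replicate_succ, List.flatten_cons]
    have hsplit : cfold ((t.flatMap (fun b => List.replicate (c b) (b - a)))
        ++ (List.replicate m (t.flatMap (fun b => List.replicate (c b) (b - a)))).flatten) d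
        = cfold (List.replicate m (t.flatMap (fun b => List.replicate (c b) (b - a)))).flatten
            (cfold (t.flatMap (fun b => List.replicate (c b) (b - a))) d) := by
      unfold cfold; rw [List.foldl_append]
    rw [hsplit, cfold_onepass t a c hpos d]
    by_cases hm : 0 < m
    · rw [ih hm, fold_modify_fuse t (fun b => b - a) _ _ hinj]
      apply PySem.List.foldl_congr_mem
      intro acc b _
      have : ((c b : Int) + (m : Int) * (c b : Int)) = ((m + 1 : Nat) : Int) * (c b : Int) := by
        push_cast; ring
      rw [this]
    · have : m = 0 := by omega
      subst this
      show cfold [].flatten _ = _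
      have h1 : cfold [].flatten (t.foldl (fun d b => d.modify (b - a) 0 (· + (c b : Int))) d)
          = t.foldl (fun d b => d.modify (b - a) 0 (· + (c b : Int))) d := rfl
      rw [h1]
      apply PySem.List.foldl_congr_mem
      intro acc b _
      norm_num

-- the heart: counting A's diff list of the run-length-decoded spectrum = B's weighted key-pair loop
theorem main_lemma (ks : List Int) (c : Int → Nat) :
    ks.Pairwise (· < ·) → (∀ k ∈ ks, 0 < c k) →
    ∀ d, cfold (convA (ks.flatMap (fun k => List.replicate (c k) k))) d
      = tailsFold (innerB (fun b => (c b : Int))) ks d := by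
  induction ks with
  | nil => intro _ _ d; rfl
  | cons a t ih =>
    intro hlt hpos d
    rw [List.pairwise_cons] at hlt
    rw [List.flatMap_cons, convA_replicate_append]
    have hT : ∀ y ∈ t.flatMap (fun k => List.replicate (c k) k), a < y := by
      intro y hy
      obtain ⟨b, hb, hyb⟩ := List.mem_flatMap.mp hy
      rw [List.eq_of_mem_replicate hyb]
      exact hlt.1 b hb
    have hfilter : (t.flatMap (fun k => List.replicate (c k) k)).filter
        (fun y => decide (y - a > 0)) = t.flatMap (fun k => List.replicate (c k) k) := by
      apply List.filter_eq_self.mpr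
      intro y hy
      simpa using by have := hT y hy; omega
    rw [hfilter]
    have hmap : (t.flatMap (fun k => List.replicate (c k) k)).map (fun y => y - a)
        = t.flatMap (fun b => List.replicate (c b) (b - a)) := by
      rw [List.map_flatMap]
      simp
    rw [hmap]
    have hsplit : ∀ (l₁ l₂ : List Int) (d : PySem.Dict Int Int),
        cfold (l₁ ++ l₂) d = cfold l₂ (cfold l₁ d) := by
      intro l₁ l₂ d; unfold cfold; rw [List.foldl_append]
    rw [hsplit]
    rw [cfold_multipass t a c (fun b hb => hpos b (List.mem_cons_of_mem a hb)) hlt.2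
      (c a) (hpos a List.mem_cons_self)]
    show cfold (convA (t.flatMap fun k => List.replicate (c k) k)) _
        = tailsFold (innerB fun b => (c b : Int)) t (innerB (fun b => (c b : Int)) a t d)
    rw [ih hlt.2 (fun b hb => hpos b (List.mem_cons_of_mem a hb))]
    rfl

-- ===== run-length decomposition of the sorted spectrum along its sorted distinct values =====
theorem count_flatMap_replicate (ks : List Int) (c : Int → Nat) (hnd : ks.Nodup) (v : Int) :
    (ks.flatMap (fun k => List.replicate (c k) k)).count v = if v ∈ ks then c v else 0 := by
  induction ks with
  | nil => simp
  | cons k t ih =>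
    rw [List.flatMap_cons, List.count_append, List.count_replicate]
    rw [List.nodup_cons] at hnd
    rw [ih hnd.2]
    by_cases hv : v = k
    · subst hv
      simp [hnd.1]
    · simp [hv, Ne.symm hv]

theorem keysOf_pairwise_lt (spectrum : List Int) :
    (PySem.List.sorted (PySem.Set.ofList spectrum) (fun x => x) false).Pairwise (· < ·) := by
  have hle := PySem.List.sorted_pairwise (PySem.Set.ofList spectrum) (fun x => x)
  have hnd : (PySem.List.sorted (PySem.Set.ofList spectrum) (fun x => x) false).Nodup :=
    (PySem.List.sorted_perm (PySem.Set.ofList spectrum) (fun x => x) false).nodup_iff.mpr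
      (PySem.Set.nodup_ofList spectrum)
  have := hle.and hnd
  exact this.imp (fun h => lt_of_le_of_ne h.1 h.2)

theorem flatMap_replicate_pairwise_le (ks : List Int) (c : Int → Nat)
    (h : ks.Pairwise (· < ·)) :
    (ks.flatMap (fun k => List.replicate (c k) k)).Pairwise (· ≤ ·) := by
  induction ks with
  | nil => simp
  | cons k t ih =>
    rw [List.pairwise_cons] at h
    rw [List.flatMap_cons]
    apply List.pairwise_append.mpr
    refine ⟨List.pairwise_replicate.mpr (by simp), ih h.2, ?_⟩
    intro x hx y hy
    rw [List.eq_of_mem_replicate hx]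
    obtain ⟨b, hb, hyb⟩ := List.mem_flatMap.mp hy
    rw [List.eq_of_mem_replicate hyb]
    exact le_of_lt (h.1 b hb)

theorem sorted_eq_flatMap_replicate (spectrum : List Int) :
    PySem.List.sorted spectrum (fun x => x) false
    = (PySem.List.sorted (PySem.Set.ofList spectrum) (fun x => x) false).flatMap
        (fun k => List.replicate (spectrum.count k) k) := by
  set ks := PySem.List.sorted (PySem.Set.ofList spectrum) (fun x => x) false with hks
  have hnd : ks.Nodup :=
    (PySem.List.sorted_perm (PySem.Set.ofList spectrum) (fun x => x) false).nodup_iff.mpr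
      (PySem.Set.nodup_ofList spectrum)
  have hmem : ∀ v : Int, v ∈ ks ↔ v ∈ spectrum := by
    intro v
    rw [hks, PySem.List.mem_sorted, PySem.Set.mem_ofList]
  have hperm : (PySem.List.sorted spectrum (fun x => x) false).Perm
      (ks.flatMap (fun k => List.replicate (spectrum.count k) k)) := by
    rw [List.perm_iff_count]
    intro v
    rw [(PySem.List.sorted_perm spectrum (fun x => x) false).count_eq]
    rw [count_flatMap_replicate ks _ hnd v]
    by_cases hv : v ∈ ks
    · simp [hv]
    · simp [hv]
      exact List.count_eq_zero.mpr (fun h => hv ((hmem v).mpr h))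
  exact PySem.List.eq_of_perm_of_pairwise_le_of_injective (fun x => x) (fun a b h => h) hperm
    (PySem.List.sorted_pairwise spectrum (fun x => x))
    (flatMap_replicate_pairwise_le ks _ (keysOf_pairwise_lt spectrum))

-- ===== normal forms of the two ports =====
-- the last element's inner loop is empty, so enumerating s[:-1] equals enumerating all of s
theorem foldl_enum_dropLast {α σ : Type} (s : List α) (H : α → List α → σ → σ)
    (h0 : ∀ x acc, H x [] acc = acc) (acc : σ) :
    (PySem.List.enumerate s.dropLast 0).foldl
      (fun acc p => H p.2 (s.drop (p.1 + 1).toNat) acc) acc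
    = (PySem.List.enumerate s 0).foldl
      (fun acc p => H p.2 (s.drop (p.1 + 1).toNat) acc) acc := by
  by_cases hs : s = []
  · subst hs; rfl
  · have key : PySem.List.enumerate s 0
        = PySem.List.enumerate s.dropLast 0 ++ [((s.dropLast.length : Int), s.getLast hs)] := by
      conv_lhs => rw [← List.dropLast_append_getLast hs]
      rw [PySem.List.enumerate_append, PySem.List.enumerate_cons]
      norm_num
    rw [key, List.foldl_append]
    simp only [List.foldl_cons, List.foldl_nil]
    have hl : (((s.dropLast.length : Int)) + 1).toNat = s.length := by
      have h1 : s.dropLast.length = s.length - 1 := by simp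
      have : 1 ≤ s.length := List.length_pos_iff.mpr hs
      omega
    rw [hl, List.drop_length, h0]

theorem A_norm (spectrum : List Int) :
    spectrumConvolution spectrum
    = (cfold (convA (PySem.List.sorted spectrum (fun x => x) false)) PySem.Dict.empty).items := by
  unfold spectrumConvolution
  set s := PySem.List.sorted spectrum (fun x => x) false with hs
  simp only [PySem.List.slice_to_neg_one]
  rw [PySem.Dict.counter_eq_foldl]
  have hbody : (PySem.List.enumerate s.dropLast 0).foldl
      (fun conv p =>
        (PySem.List.enumerate (PySem.List.slice s (some (p.1 + 1)) none)).foldl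
          (fun conv q => let diff := q.2 - p.2; if diff > 0 then conv ++ [diff] else conv) conv) []
      = (PySem.List.enumerate s.dropLast 0).foldl
      (fun acc p => innerA p.2 (s.drop (p.1 + 1).toNat) acc) [] := by
    apply PySem.List.foldl_congr_mem
    intro acc p hp
    obtain ⟨k, hk, rfl⟩ := (PySem.List.mem_enumerate_iff _ _ _).mp hp
    have h1 : PySem.List.slice s (some ((0 + (k : Int)) + 1)) none
        = s.drop ((0 + (k : Int)) + 1).toNat := PySem.List.slice_from s (by omega)
    rw [h1]
    exact foldl_enumerate_snd _ (fun conv y =>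
      if y - (s.dropLast[k]) > 0 then conv ++ [y - s.dropLast[k]] else conv) 0 acc
  rw [hbody, foldl_enum_dropLast s innerA (fun x acc => rfl)]
  have := foldl_enum_tails s innerA s 0 (by simp) []
  simp only [Nat.cast_zero] at this
  rw [this, tailsFold_innerA]
  rfl

theorem B_norm (spectrum : List Int) :
    spectrumConvolution_alt spectrum
    = (tailsFold (innerB (fun b => (spectrum.count b : Int)))
        (PySem.List.sorted (PySem.Set.ofList spectrum) (fun x => x) false) PySem.Dict.empty).items := by
  unfold spectrumConvolution_alt
  simp only [PySem.Dict.keys_counter]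
  set keys := PySem.List.sorted (PySem.Set.ofList spectrum) (fun x => x) false with hkeys
  congr 1
  have hbody : (PySem.List.enumerate keys 0).foldl
      (fun d p =>
        (PySem.List.slice keys (some (p.1 + 1)) none).foldl
          (fun d b => d.modify (b - p.2) 0
            (· + (PySem.Dict.counter spectrum).getD p.2 0 * (PySem.Dict.counter spectrum).getD b 0)) d)
      PySem.Dict.empty
      = (PySem.List.enumerate keys 0).foldl
      (fun d p => innerB (fun b => (spectrum.count b : Int)) p.2 (keys.drop (p.1 + 1).toNat) d)
      PySem.Dict.empty := by
    apply PySem.List.foldl_congr_mem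
    intro d p hp
    obtain ⟨k, hk, rfl⟩ := (PySem.List.mem_enumerate_iff _ _ _).mp hp
    have h1 : PySem.List.slice keys (some ((0 + (k : Int)) + 1)) none
        = keys.drop ((0 + (k : Int)) + 1).toNat := PySem.List.slice_from keys (by omega)
    rw [h1]
    unfold innerB
    apply PySem.List.foldl_congr_mem
    intro d b _
    rw [PySem.Dict.getD_counter, PySem.Dict.getD_counter]
  rw [hbody]
  have := foldl_enum_tails keys (innerB (fun b => (spectrum.count b : Int))) keys 0 (by simp) PySem.Dict.empty
  simp only [Nat.cast_zero] at this
  rw [this]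

-- ===== VERDICT (by name: the statement is the Claim_ definition above) =====
theorem spectrumConvolution_spec : Claim_equal_spectrumConvolution := by
  intro spectrum _
  unfold Spec_spectrumConvolution
  rw [A_norm, B_norm, sorted_eq_flatMap_replicate]
  have hpos : ∀ k ∈ PySem.List.sorted (PySem.Set.ofList spectrum) (fun x => x) false,
      0 < spectrum.count k := by
    intro k hk
    rw [PySem.List.mem_sorted, PySem.Set.mem_ofList] at hk
    exact List.count_pos_iff.mpr hk
  rw [main_lemma _ _ (keysOf_pairwise_lt spectrum) hpos]
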